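-- pv_equiv track=rewrite | github.com/gauriwadatkar9/Ai-predictive-cloud-observability | processing/alert_clustering.py | cluster_alerts
-- ===== SOURCE A (Python) =====
-- def cluster_alerts(metrics):
--     """
--     Simple alert clustering based on metrics.
--     Returns a list of alert strings.
--     """
--     alerts = []
--
--     if metrics.get("CPU Usage", 0) > 80:
--         alerts.append("High CPU Usage")
--
--     if metrics.get("Memory Usage", 0) > 80:
--         alerts.append("High Memory Usage")
--
--     if metrics.get("Errors", 0) > 5:
--         alerts.append("Multiple Errors")
--
--     if metrics.get("Response Time(ms)", 0) > 800:
--         alerts.append("Slow Response Time")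
--
--     # Return a formatted list of incidents
--     if alerts:
--         # Use enumerate to create incident numbers
--         return [f"Incident {idx+1}: {alert}" for idx, alert in enumerate(alerts)]
--     else:
--         return []
-- ===== SOURCE B (Python) =====
-- SPEC = {
--     "CPU Usage": (0, 80),
--     "Memory Usage": (1, 80),
--     "Errors": (2, 5),
--     "Response Time(ms)": (3, 800),
-- }
-- LABELS = ["High CPU Usage", "High Memory Usage", "Multiple Errors", "Slow Response Time"]
--
-- def cluster_alerts(metrics):
--     # One pass over the input's own items building a 4-bit mask, then decode the mask.
--     mask = 0
--     for key, value in metrics.items():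
--         info = SPEC.get(key)
--         if info is not None and value > info[1]:
--             mask += 1 << info[0]
--     out = []
--     for bit, label in enumerate(LABELS):
--         if mask >> bit & 1:
--             out.append("Incident %d: %s" % (len(out) + 1, label))
--     return out
-- ===== Notes on version B (the rewrite author's own statement) =====
-- stated objective: alternative
-- what changed: Instead of four hard-coded threshold ifs appending labels and a separate enumerate-formatting comprehension, B makes one pass over the metrics' own items accumulating a 4-bit mask via a key->(bit,threshold) spec dict, then decodes the mask bit by bit into numbered incident strings.
import Mathlib
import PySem

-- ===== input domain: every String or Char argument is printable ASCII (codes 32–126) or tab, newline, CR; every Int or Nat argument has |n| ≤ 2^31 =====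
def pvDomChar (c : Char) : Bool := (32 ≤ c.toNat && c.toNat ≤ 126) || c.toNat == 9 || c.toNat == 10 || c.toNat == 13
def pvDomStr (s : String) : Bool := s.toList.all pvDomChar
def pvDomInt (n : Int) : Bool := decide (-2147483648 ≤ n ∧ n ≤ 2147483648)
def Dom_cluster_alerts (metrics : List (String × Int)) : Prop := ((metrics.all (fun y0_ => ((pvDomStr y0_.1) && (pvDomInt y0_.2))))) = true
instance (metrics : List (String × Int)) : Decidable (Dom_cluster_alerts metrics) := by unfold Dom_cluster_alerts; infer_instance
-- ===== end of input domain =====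

-- B replaces A's four hard-coded if/append blocks plus enumerate-formatting pass with a
-- single pass over the metrics' items accumulating a bitmask, then a mask decode (objective: alternative).

-- ===== PORT A =====
-- metrics.get(k, 0): association list, first match (the dict type convention)
def pyMetGet (metrics : List (String × Int)) (k : String) : Int :=
  (metrics.lookup k).getD 0

def cluster_alerts (metrics : List (String × Int)) : List String :=
  let alerts : List String := []
  let alerts := if pyMetGet metrics "CPU Usage" > 80 then alerts ++ ["High CPU Usage"] else alerts
  let alerts := if pyMetGet metrics "Memory Usage" > 80 then alerts ++ ["High Memory Usage"] else alerts
  let alerts := if pyMetGet metrics "Errors" > 5 then alerts ++ ["Multiple Errors"] else alerts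
  let alerts := if pyMetGet metrics "Response Time(ms)" > 800 then alerts ++ ["Slow Response Time"] else alerts
  if alerts ≠ [] then
    (PySem.List.enumerate alerts 0).map
      (fun p => "Incident " ++ PySem.Int.toStr (p.1 + 1) ++ ": " ++ p.2)
  else []

-- ===== PORT B =====
-- SPEC.get(key): the literal spec dict of Source B
def pvSpecGet (k : String) : Option (Nat × Int) :=
  if k = "CPU Usage" then some (0, 80)
  else if k = "Memory Usage" then some (1, 80)
  else if k = "Errors" then some (2, 5)
  else if k = "Response Time(ms)" then some (3, 800)
  else none

def pvLabels : List String :=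
  ["High CPU Usage", "High Memory Usage", "Multiple Errors", "Slow Response Time"]

-- the `for key, value in metrics.items()` loop of Source B; `seen` models that a Python dict
-- yields each key once with its first binding (the assoc-list convention's lookup value).
-- mask is a Python int that stays ≥ 0, modelled as Nat.
def pvScan : List (String × Int) → List String → Nat → Nat
  | [], _, mask => mask
  | (k, v) :: rest, seen, mask =>
    if k ∈ seen then pvScan rest seen mask
    else
      match pvSpecGet k with
      | some (bit, thr) =>
          pvScan rest (k :: seen) (if v > thr then mask + (1 <<< bit) else mask)
      | none => pvScan rest (k :: seen) mask

def cluster_alerts_alt (metrics : List (String × Int)) : List String :=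
  let mask := pvScan metrics [] 0
  (PySem.List.enumerate pvLabels 0).foldl
    (fun out p =>
      if (mask >>> p.1.toNat) &&& 1 == 1 then
        out ++ ["Incident " ++ PySem.Int.toStr ((out.length : Int) + 1) ++ ": " ++ p.2]
      else out) []

-- ===== PRECONDITION & SPEC =====
def Spec_cluster_alerts (metrics : List (String × Int)) (out : List String) : Prop := out = cluster_alerts_alt metrics
instance (metrics : List (String × Int)) (out : List String) : Decidable (Spec_cluster_alerts metrics out) := by unfold Spec_cluster_alerts; infer_instance

-- ===== CLAIM (what is proved, stated in full; the proofs are below) =====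
def Claim_equal_cluster_alerts : Prop := ∀ (metrics : List (String × Int)), Dom_cluster_alerts metrics → Spec_cluster_alerts metrics (cluster_alerts metrics)


-- ===== LEMMAS AND PROOFS =====
lemma pyMetGet_cons (k : String) (v : Int) (rest : List (String × Int)) (key : String) :
    pyMetGet ((k, v) :: rest) key = if k = key then v else pyMetGet rest key := by
  simp only [pyMetGet, List.lookup]
  by_cases h : k = key
  · simp [h]
  · have hb : (key == k) = false := beq_eq_false_iff_ne.mpr (fun e => h e.symm)
    simp [h, hb]

lemma pvScan_cons_seen (k : String) (v : Int) (rest : List (String × Int))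
    (seen : List String) (mask : Nat) (hk : k ∈ seen) :
    pvScan ((k, v) :: rest) seen mask = pvScan rest seen mask := by
  simp [pvScan, hk]

lemma pvScan_cons_cpu (v : Int) (rest : List (String × Int)) (seen : List String)
    (mask : Nat) (hk : "CPU Usage" ∉ seen) :
    pvScan (("CPU Usage", v) :: rest) seen mask
      = pvScan rest ("CPU Usage" :: seen) (if v > 80 then mask + 1 else mask) := by
  simp [pvScan, hk, pvSpecGet]

lemma pvScan_cons_mem (v : Int) (rest : List (String × Int)) (seen : List String)
    (mask : Nat) (hk : "Memory Usage" ∉ seen) :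
    pvScan (("Memory Usage", v) :: rest) seen mask
      = pvScan rest ("Memory Usage" :: seen) (if v > 80 then mask + 2 else mask) := by
  simp [pvScan, hk, pvSpecGet]

lemma pvScan_cons_err (v : Int) (rest : List (String × Int)) (seen : List String)
    (mask : Nat) (hk : "Errors" ∉ seen) :
    pvScan (("Errors", v) :: rest) seen mask
      = pvScan rest ("Errors" :: seen) (if v > 5 then mask + 4 else mask) := by
  simp [pvScan, hk, pvSpecGet]

lemma pvScan_cons_rt (v : Int) (rest : List (String × Int)) (seen : List String)
    (mask : Nat) (hk : "Response Time(ms)" ∉ seen) :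
    pvScan (("Response Time(ms)", v) :: rest) seen mask
      = pvScan rest ("Response Time(ms)" :: seen) (if v > 800 then mask + 8 else mask) := by
  simp [pvScan, hk, pvSpecGet]

lemma pvScan_cons_other (k : String) (v : Int) (rest : List (String × Int))
    (seen : List String) (mask : Nat) (hk : k ∉ seen)
    (h1 : k ≠ "CPU Usage") (h2 : k ≠ "Memory Usage") (h3 : k ≠ "Errors")
    (h4 : k ≠ "Response Time(ms)") :
    pvScan ((k, v) :: rest) seen mask = pvScan rest (k :: seen) mask := by
  simp [pvScan, hk, pvSpecGet, h1, h2, h3, h4]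

lemma pvScan_eq (metrics : List (String × Int)) (seen : List String) (mask : Nat) :
    pvScan metrics seen mask = mask
      + (if "CPU Usage" ∉ seen ∧ pyMetGet metrics "CPU Usage" > 80 then 1 else 0)
      + (if "Memory Usage" ∉ seen ∧ pyMetGet metrics "Memory Usage" > 80 then 2 else 0)
      + (if "Errors" ∉ seen ∧ pyMetGet metrics "Errors" > 5 then 4 else 0)
      + (if "Response Time(ms)" ∉ seen ∧ pyMetGet metrics "Response Time(ms)" > 800 then 8 else 0) := by
  induction metrics generalizing seen mask with
  | nil => simp [pvScan, pyMetGet]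
  | cons kv rest ih =>
    obtain ⟨k, v⟩ := kv
    by_cases hk : k ∈ seen
    · rw [pvScan_cons_seen _ _ _ _ _ hk, ih]
      simp only [pyMetGet_cons]
      by_cases h1 : k = "CPU Usage" <;> by_cases h2 : k = "Memory Usage" <;>
        by_cases h3 : k = "Errors" <;> by_cases h4 : k = "Response Time(ms)" <;>
        simp [h1, h2, h3, h4] <;> subst_vars <;> simp [hk]
    · by_cases h1 : k = "CPU Usage"
      · subst h1
        rw [pvScan_cons_cpu _ _ _ _ hk, ih]
        simp only [pyMetGet_cons, List.mem_cons]
        simp [hk]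
        split_ifs <;> omega
      by_cases h2 : k = "Memory Usage"
      · subst h2
        rw [pvScan_cons_mem _ _ _ _ hk, ih]
        simp only [pyMetGet_cons, List.mem_cons]
        simp [hk]
        split_ifs <;> omega
      by_cases h3 : k = "Errors"
      · subst h3
        rw [pvScan_cons_err _ _ _ _ hk, ih]
        simp only [pyMetGet_cons, List.mem_cons]
        simp [hk]
        split_ifs <;> omega
      by_cases h4 : k = "Response Time(ms)"
      · subst h4
        rw [pvScan_cons_rt _ _ _ _ hk, ih]
        simp only [pyMetGet_cons, List.mem_cons]
        simp [hk]
        split_ifs <;> omega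
      · rw [pvScan_cons_other _ _ _ _ _ hk h1 h2 h3 h4, ih]
        simp only [pyMetGet_cons, List.mem_cons]
        have n1 : ¬("CPU Usage" = k) := fun e => h1 e.symm
        have n2 : ¬("Memory Usage" = k) := fun e => h2 e.symm
        have n3 : ¬("Errors" = k) := fun e => h3 e.symm
        have n4 : ¬("Response Time(ms)" = k) := fun e => h4 e.symm
        simp [h1, h2, h3, h4, n1, n2, n3, n4]

-- ===== VERDICT (by name: the statement is the Claim_ definition above) =====
theorem cluster_alerts_spec : Claim_equal_cluster_alerts := by
  intro metrics _
  unfold Spec_cluster_alerts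
  unfold cluster_alerts cluster_alerts_alt
  rw [pvScan_eq]
  by_cases h1 : pyMetGet metrics "CPU Usage" > 80 <;>
    by_cases h2 : pyMetGet metrics "Memory Usage" > 80 <;>
    by_cases h3 : pyMetGet metrics "Errors" > 5 <;>
    by_cases h4 : pyMetGet metrics "Response Time(ms)" > 800 <;>
    simp [h1, h2, h3, h4] <;> decide
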